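-- pv_equiv track=rewrite | github.com/CarmeloA/Bluecard | new_val_work/update_gt/update.py | load_detect_result
-- ===== SOURCE A (Python) =====
-- def load_detect_result(l,lines):
--     for path_list in l:
--         path = path_list[0]
--         name = path.split('/')[-1]
--         for line in lines:
--             name_in_txt = line.split(' ')[0].split('/')[-1][:-1]
--             if name == name_in_txt:
--                 path_list.append(line)
--                 break
--     return l
-- ===== SOURCE B (Python) =====
-- def load_detect_result(l, lines):
--     # Index the path_lists by filename once, then scan lines once in order;
--     # like A, this appends to the path_list objects in place and returns l.
--     pending = {}
--     for path_list in l: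
--         name = path_list[0].split('/')[-1]
--         pending.setdefault(name, []).append(path_list)
--     for line in lines:
--         name_in_txt = line.split(' ')[0].split('/')[-1][:-1]
--         targets = pending.pop(name_in_txt, None)
--         if targets is not None:
--             for path_list in targets:
--                 path_list.append(line)
--     return l
-- ===== Notes on version B (the rewrite author's own statement) =====
-- stated objective: faster
-- what changed: Instead of rescanning all lines for every path_list (nested loops with break), B builds a filename->path_lists index once and then scans lines exactly once, popping each filename the first time a line matches it.
import Mathlib
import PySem

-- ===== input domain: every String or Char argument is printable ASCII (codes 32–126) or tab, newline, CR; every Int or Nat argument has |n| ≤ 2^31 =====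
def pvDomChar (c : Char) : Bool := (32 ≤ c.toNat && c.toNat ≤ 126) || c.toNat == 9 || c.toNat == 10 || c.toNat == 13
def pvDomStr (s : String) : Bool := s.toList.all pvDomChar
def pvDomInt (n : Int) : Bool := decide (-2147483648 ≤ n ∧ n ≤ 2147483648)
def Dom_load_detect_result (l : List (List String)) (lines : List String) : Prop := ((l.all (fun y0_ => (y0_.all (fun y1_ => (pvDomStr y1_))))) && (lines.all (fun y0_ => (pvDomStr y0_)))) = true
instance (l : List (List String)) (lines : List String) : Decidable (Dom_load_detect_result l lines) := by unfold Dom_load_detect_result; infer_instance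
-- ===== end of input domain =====

-- B replaces A's rescan of all lines per path_list by one filename->path_lists index built
-- once and a single in-order scan of lines (alternative algorithm; A and B mutate the inner
-- lists of l in Python the same way — the equivalence proved here is about the return value).

-- ===== PORT A =====
-- path.split('/')[-1]
def pvPathName (path : String) : String :=
  PySem.List.pyGetD ((PySem.Str.split? path "/").getD []) (-1) ""

-- line.split(' ')[0].split('/')[-1][:-1]
def pvLineName (line : String) : String :=
  PySem.Str.slice
    (pvPathName (PySem.List.pyGetD ((PySem.Str.split? line " ").getD []) 0 ""))
    none (some (-1))

-- path_list[0].split('/')[-1]  (path_list[0] total under Pre_: inner lists nonempty)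
def pvKey (pl : List String) : String := pvPathName (PySem.List.pyGetD pl 0 "")

-- A's inner loop: first matching line is appended, then break
def pvFindA (name : String) (pl : List String) : List String → List String
  | [] => pl
  | line :: rest => if pvLineName line == name then pl ++ [line] else pvFindA name pl rest

def load_detect_result (l : List (List String)) (lines : List String) : List (List String) :=
  l.map (fun pl => pvFindA (pvKey pl) pl lines)

-- ===== PORT B =====
-- first loop of B: pending.setdefault(name, []).append(path_list) over enumerate(l)
def pvBuild : Nat → List (List String) → PySem.Dict String (List Nat) → PySem.Dict String (List Nat)
  | _, [], d => d
  | i, pl :: rest, d => pvBuild (i + 1) rest (d.modify (pvKey pl) [] (· ++ [i]))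

-- one line of B's second loop: targets = pending.pop(name_in_txt, None); append to each target
def pvStep (st : List (List String) × PySem.Dict String (List Nat)) (line : String) :
    List (List String) × PySem.Dict String (List Nat) :=
  match st.2.get? (pvLineName line) with
  | some idxs => (idxs.foldl (fun r i => r.modify i (· ++ [line])) st.1, st.2.erase (pvLineName line))
  | none => st

def load_detect_result_alt (l : List (List String)) (lines : List String) : List (List String) :=
  (lines.foldl pvStep (l, pvBuild 0 l PySem.Dict.empty)).1

-- ===== PRECONDITION & SPEC =====
-- Pre_ excludes exactly the inputs where Python A raises: an empty inner list makes
-- path_list[0] an IndexError (B raises there too).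
def Pre_load_detect_result (l : List (List String)) (lines : List String) : Prop :=
  ∀ pl ∈ l, pl ≠ []
instance (l : List (List String)) (lines : List String) : Decidable (Pre_load_detect_result l lines) := by
  unfold Pre_load_detect_result; infer_instance

def pvWitness_load_detect_result : List (List String) × List String :=
  ([["run/b.txt"], ["c.txt"]], ["run/b.txt: ok", "c.txt: no"])

def Spec_load_detect_result (l : List (List String)) (lines : List String) (out : List (List String)) : Prop := out = load_detect_result_alt l lines
instance (l : List (List String)) (lines : List String) (out : List (List String)) : Decidable (Spec_load_detect_result l lines out) := by unfold Spec_load_detect_result; infer_instance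

-- ===== CLAIM (what is proved, stated in full; the proofs are below) =====
def Claim_equal_load_detect_result : Prop := ∀ (l : List (List String)) (lines : List String), Dom_load_detect_result l lines → Pre_load_detect_result l lines → Spec_load_detect_result l lines (load_detect_result l lines)

-- ===== LEMMAS AND PROOFS =====

-- the indices (counting from s) of the path_lists of ls whose filename is n
def pvIdxs (s : Nat) : List (List String) → String → List Nat
  | [], _ => []
  | pl :: rest, n => (if pvKey pl = n then [s] else []) ++ pvIdxs (s + 1) rest n

theorem mem_pvIdxs (ls : List (List String)) (n : String) :
    ∀ (s i : Nat), i ∈ pvIdxs s ls n ↔ ∃ j, ∃ h : j < ls.length, i = s + j ∧ pvKey ls[j] = n := by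
  induction ls with
  | nil => intro s i; simp [pvIdxs]
  | cons pl rest ih =>
    intro s i
    simp only [pvIdxs, List.mem_append, ih (s + 1) i]
    constructor
    · rintro (hmem | ⟨j, hj, rfl, hk⟩)
      · refine ⟨0, by simp, ?_⟩
        by_cases h : pvKey pl = n
        · simp [h] at hmem; simp [hmem, h]
        · simp [h] at hmem
      · exact ⟨j + 1, by simp; omega, by omega, by simpa using hk⟩
    · rintro ⟨j, hj, rfl, hk⟩
      cases j with
      | zero => left; simp at hk; simp [hk]
      | succ j =>
        have hj' : j < rest.length := by simp at hj; omega
        right; exact ⟨j, hj', by omega, by simpa using hk⟩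

theorem pvIdxs_lb (ls : List (List String)) (n : String) (s i : Nat)
    (h : i ∈ pvIdxs s ls n) : s ≤ i := by
  rcases (mem_pvIdxs ls n s i).1 h with ⟨j, hj, rfl, _⟩; omega

theorem nodup_pvIdxs (ls : List (List String)) (n : String) : ∀ s, (pvIdxs s ls n).Nodup := by
  induction ls with
  | nil => intro s; simp [pvIdxs]
  | cons pl rest ih =>
    intro s
    by_cases h : pvKey pl = n
    · simp only [pvIdxs, h, if_pos]
      refine List.Nodup.cons (fun hmem => ?_) (ih (s + 1))
      have := pvIdxs_lb rest n (s + 1) s hmem; omega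
    · simpa [pvIdxs, h] using ih (s + 1)

theorem pvFindFilter {ν : Type} (k k' : String) :
    ∀ (items : List (String × ν)),
    List.find? (fun p => p.1 == k') (items.filter (fun p => !(p.1 == k))) =
      if k' = k then none else List.find? (fun p => p.1 == k') items := by
  intro items
  induction items with
  | nil => simp
  | cons p rest ih =>
    by_cases hpk : p.1 = k
    · rw [List.filter_cons_of_neg (by simp [hpk])]
      rw [ih]
      by_cases hk : k' = k
      · simp [hk]
      · rw [if_neg hk, if_neg hk,
            List.find?_cons_of_neg (by simp [hpk]; exact fun h => hk (Eq.symm h))]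
    · rw [List.filter_cons_of_pos (by simp [hpk])]
      by_cases hpk' : p.1 = k'
      · have hk : ¬ k' = k := fun h => hpk (by rw [hpk', h])
        rw [List.find?_cons_of_pos (by simp [hpk']),
            List.find?_cons_of_pos (by simp [hpk']), if_neg hk]
      · rw [List.find?_cons_of_neg (by simp [hpk']),
            List.find?_cons_of_neg (by simp [hpk']), ih]

theorem dict_get?_erase {ν : Type} (d : PySem.Dict String ν) (k k' : String) :
    (d.erase k).get? k' = if k' = k then none else d.get? k' := by
  obtain ⟨items⟩ := d
  simp only [PySem.Dict.erase, PySem.Dict.get?]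
  rw [pvFindFilter]
  split_ifs <;> simp

theorem dict_get?_modify {ν : Type} (d : PySem.Dict String ν) (k k' : String) (d0 : ν) (f : ν → ν) :
    (d.modify k d0 f).get? k' = if k' = k then some (f (d.getD k d0)) else d.get? k' := by
  simp [PySem.Dict.modify, PySem.Dict.get?_insert]

theorem get?_pvBuild (ls : List (List String)) :
    ∀ (s : Nat) (d : PySem.Dict String (List Nat)) (n : String),
    (pvBuild s ls d).get? n =
      match d.get? n with
      | some v => some (v ++ pvIdxs s ls n)
      | none => if pvIdxs s ls n = [] then none else some (pvIdxs s ls n) := by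
  induction ls with
  | nil => intro s d n; cases h : d.get? n <;> simp [pvBuild, pvIdxs, h]
  | cons pl rest ih =>
    intro s d n
    rw [show pvBuild s (pl :: rest) d = pvBuild (s + 1) rest (d.modify (pvKey pl) [] (· ++ [s])) from rfl,
        ih]
    rw [dict_get?_modify, PySem.Dict.getD_eq_get?_getD]
    by_cases h : pvKey pl = n
    · rw [if_pos (by exact h.symm)]
      cases hdn : d.get? n <;> simp [pvIdxs, h, hdn]
    · rw [if_neg (fun hn => h hn.symm)]
      cases hdn : d.get? n <;> simp [pvIdxs, h, hdn]

theorem getElem?_foldl_modify (line : String) :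
    ∀ (idxs : List Nat) (r : List (List String)) (i : Nat), idxs.Nodup →
    (idxs.foldl (fun r j => r.modify j (· ++ [line])) r)[i]? =
      if i ∈ idxs then r[i]?.map (· ++ [line]) else r[i]? := by
  intro idxs
  induction idxs with
  | nil => simp
  | cons j js ih =>
    intro r i hnd
    rw [List.nodup_cons] at hnd
    rw [List.foldl_cons, ih _ _ hnd.2]
    by_cases hij : i = j
    · subst hij
      simp [hnd.1, List.getElem?_modify]
    · have hji : ¬ j = i := fun h => hij (Eq.symm h)
      simp only [List.mem_cons, hij, false_or]
      by_cases hmem : i ∈ js <;>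
        simp [hmem, List.getElem?_modify, hji]

theorem length_foldl_modify (line : String) (idxs : List Nat) :
    ∀ (r : List (List String)),
    (idxs.foldl (fun r j => r.modify j (· ++ [line])) r).length = r.length := by
  induction idxs with
  | nil => simp
  | cons j js ih => intro r; rw [List.foldl_cons, ih]; simp

theorem length_foldl_pvStep (ls : List String) :
    ∀ (r : List (List String)) (pend : PySem.Dict String (List Nat)),
    (ls.foldl pvStep (r, pend)).1.length = r.length := by
  induction ls with
  | nil => intro r pend; rfl
  | cons line rest ih =>
    intro r pend
    rw [List.foldl_cons]
    cases hg : pend.get? (pvLineName line) with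
    | none =>
      have hstep : pvStep (r, pend) line = (r, pend) := by simp only [pvStep, hg]
      rw [hstep, ih]
    | some idxs =>
      have hstep : pvStep (r, pend) line =
          (idxs.foldl (fun r i => r.modify i (· ++ [line])) r, pend.erase (pvLineName line)) := by
        simp only [pvStep, hg]
      rw [hstep, ih, length_foldl_modify]

theorem foldl_pvStep_getElem? (l : List (List String)) (ls : List String) :
    ∀ (r : List (List String)) (pend : PySem.Dict String (List Nat)),
    (∀ n idxs, pend.get? n = some idxs → idxs = pvIdxs 0 l n) →
    (∀ i, i < l.length → (pend.get? (pvKey l[i]!)).isSome → r[i]? = l[i]?) →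
    ∀ i, i < l.length →
    (ls.foldl pvStep (r, pend)).1[i]? =
      if (pend.get? (pvKey l[i]!)).isSome then (l[i]?).map (fun pl => pvFindA (pvKey pl) pl ls)
      else r[i]? := by
  induction ls with
  | nil =>
    intro r pend _ hr i hi
    by_cases h : (pend.get? (pvKey l[i]!)).isSome
    · simp only [List.foldl_nil, if_pos h]
      rw [hr i hi h, List.getElem?_eq_getElem hi]
      simp [pvFindA]
    · simp only [List.foldl_nil, if_neg h]
  | cons line rest ih =>
    intro r pend hpend hr i hi
    have hgetl : l[i]? = some l[i]! := by
      rw [List.getElem?_eq_getElem hi, List.getElem!_eq_getElem?_getD, List.getElem?_eq_getElem hi]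
      rfl
    rw [List.foldl_cons]
    cases hg : pend.get? (pvLineName line) with
    | none =>
      have hstep : pvStep (r, pend) line = (r, pend) := by simp only [pvStep, hg]
      rw [hstep, ih r pend hpend hr i hi]
      by_cases hk : pvKey l[i]! = pvLineName line
      · rw [hk, hg]; simp
      · by_cases hs : (pend.get? (pvKey l[i]!)).isSome
        · have hbeq : (pvLineName line == pvKey l[i]!) = false := by
            rw [beq_eq_false_iff_ne]
            exact fun h => hk (Eq.symm h)
          have hstepA : pvFindA (pvKey l[i]!) l[i]! (line :: rest) =
              pvFindA (pvKey l[i]!) l[i]! rest := by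
            simp only [pvFindA, hbeq, Bool.false_eq_true, if_false]
          rw [if_pos hs, if_pos hs, hgetl, Option.map_some, Option.map_some, hstepA]
        · rw [if_neg hs, if_neg hs]
    | some idxs =>
      have hstep : pvStep (r, pend) line =
          (idxs.foldl (fun r j => r.modify j (· ++ [line])) r, pend.erase (pvLineName line)) := by
        simp only [pvStep, hg]
      rw [hstep]
      have hidxs : idxs = pvIdxs 0 l (pvLineName line) := hpend _ _ hg
      have hmem : ∀ j, j < l.length → (j ∈ idxs ↔ pvKey l[j]! = pvLineName line) := by
        intro j hj
        rw [hidxs, mem_pvIdxs]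
        constructor
        · rintro ⟨j', hj', rfl, hk⟩
          simpa [List.getElem!_eq_getElem?_getD, List.getElem?_eq_getElem hj'] using hk
        · intro hk
          exact ⟨j, hj, by omega, by
            simpa [List.getElem!_eq_getElem?_getD, List.getElem?_eq_getElem hj] using hk⟩
      have hnd : idxs.Nodup := hidxs ▸ nodup_pvIdxs l (pvLineName line) 0
      set r' := idxs.foldl (fun r j => r.modify j (· ++ [line])) r with hr'
      have hpend' : ∀ n idxs', (pend.erase (pvLineName line)).get? n = some idxs' →
          idxs' = pvIdxs 0 l n := by
        intro n idxs' h
        rw [dict_get?_erase] at h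
        split_ifs at h with hne
        exact hpend _ _ h
      have hrB : ∀ j, j < l.length →
          ((pend.erase (pvLineName line)).get? (pvKey l[j]!)).isSome → r'[j]? = l[j]? := by
        intro j hj hsome
        rw [dict_get?_erase] at hsome
        split_ifs at hsome with hne
        · exact absurd hsome (by simp)
        · have hnotmem : j ∉ idxs := fun hm => hne ((hmem j hj).1 hm)
          rw [hr', getElem?_foldl_modify line idxs r j hnd, if_neg hnotmem]
          exact hr j hj hsome
      rw [ih r' (pend.erase (pvLineName line)) hpend' hrB i hi]
      by_cases hk : pvKey l[i]! = pvLineName line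
      · have hsome : (pend.get? (pvKey l[i]!)).isSome = true := by rw [hk, hg]; rfl
        rw [dict_get?_erase, if_pos hk]
        simp only [Option.isSome_none, Bool.false_eq_true, if_false, hsome, if_pos]
        rw [hr', getElem?_foldl_modify line idxs r i hnd, if_pos ((hmem i hi).2 hk),
            hr i hi hsome, hgetl]
        have hbeq : (pvLineName line == pvKey l[i]!) = true := beq_iff_eq.mpr (Eq.symm hk)
        rw [Option.map_some, Option.map_some,
            show pvFindA (pvKey l[i]!) l[i]! (line :: rest) =
              if pvLineName line == pvKey l[i]! then l[i]! ++ [line]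
              else pvFindA (pvKey l[i]!) l[i]! rest from rfl,
            hbeq, if_pos rfl]
      · rw [dict_get?_erase, if_neg hk]
        by_cases hs : (pend.get? (pvKey l[i]!)).isSome
        · have hbeq : (pvLineName line == pvKey l[i]!) = false := by
            rw [beq_eq_false_iff_ne]
            exact fun h => hk (Eq.symm h)
          have hstepA : pvFindA (pvKey l[i]!) l[i]! (line :: rest) =
              pvFindA (pvKey l[i]!) l[i]! rest := by
            simp only [pvFindA, hbeq, Bool.false_eq_true, if_false]
          rw [if_pos hs, if_pos hs, hgetl, Option.map_some, Option.map_some, hstepA]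
        · simp only [if_neg hs, hr']
          rw [getElem?_foldl_modify line idxs r i hnd,
              if_neg (fun hm => hk ((hmem i hi).1 hm))]

-- ===== VERDICT (by name: the statement is the Claim_ definition above) =====
theorem load_detect_result_spec : Claim_equal_load_detect_result := by
  intro l lines _ _
  unfold Spec_load_detect_result load_detect_result load_detect_result_alt
  apply Eq.symm
  apply List.ext_getElem?
  intro i
  by_cases hi : i < l.length
  · have hpend0 : ∀ n idxs, (pvBuild 0 l PySem.Dict.empty).get? n = some idxs →
        idxs = pvIdxs 0 l n := by
      intro n idxs h
      rw [get?_pvBuild, PySem.Dict.get?_empty] at h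
      by_cases hemp : pvIdxs 0 l n = []
      · rw [if_pos hemp] at h; exact absurd h (by simp)
      · rw [if_neg hemp] at h; exact (Option.some.inj h).symm
    rw [foldl_pvStep_getElem? l lines l (pvBuild 0 l PySem.Dict.empty) hpend0
        (fun _ _ _ => rfl) i hi]
    have hgetl : l[i]? = some l[i]! := by
      rw [List.getElem?_eq_getElem hi, List.getElem!_eq_getElem?_getD, List.getElem?_eq_getElem hi]
      rfl
    have hsome : ((pvBuild 0 l PySem.Dict.empty).get? (pvKey l[i]!)).isSome = true := by
      rw [get?_pvBuild, PySem.Dict.get?_empty]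
      have : i ∈ pvIdxs 0 l (pvKey l[i]!) := by
        refine (mem_pvIdxs l (pvKey l[i]!) 0 i).2 ⟨i, hi, by omega, ?_⟩
        rw [List.getElem!_eq_getElem?_getD, List.getElem?_eq_getElem hi]; rfl
      have hne : pvIdxs 0 l (pvKey l[i]!) ≠ [] := fun h =>
        absurd (h ▸ this) (List.not_mem_nil)
      rw [if_neg hne]
      rfl
    rw [if_pos hsome, hgetl, List.getElem?_map, hgetl]
  · have h1 : (lines.foldl pvStep (l, pvBuild 0 l PySem.Dict.empty)).1[i]? = none := by
      rw [List.getElem?_eq_none]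
      rw [length_foldl_pvStep]; omega
    have h2 : (l.map (fun pl => pvFindA (pvKey pl) pl lines))[i]? = none := by
      rw [List.getElem?_eq_none]; simpa using hi
    rw [h1, h2]
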